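-- pv_equiv track=rewrite | github.com/davisr137/HackerRank | interview/string/palindrome/palindrome.py | count_same_palindromes
-- ===== SOURCE A (Python) =====
-- def count_same_palindromes(s):
--     """
--     Count number of substrings in string s where
--     all characters are the same.
--
--     Args:
--         s (str): Our string
--
--     Returns:
--         int: Number of palindromes
--     """
--     last_letter = s[0]
--     len_seq = 1
--     count = 1
--     for letter in s[1:]:
--         if letter == last_letter:
--             len_seq += 1
--         else:
--             len_seq = 1
--         count += len_seq
--         last_letter = letter
--     return count
-- ===== SOURCE B (Python) =====
-- def count_same_palindromes(s):
--     # Sum L*(L+1)//2 over maximal runs of equal characters (triangular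
--     # count per run), in one pass with a run-length accumulator.
--     total = 0
--     run = 0
--     prev = None
--     for ch in s:
--         if ch == prev:
--             run += 1
--         else:
--             total += run * (run + 1) // 2
--             run = 1
--             prev = ch
--     total += run * (run + 1) // 2
--     return total
-- ===== Notes on version B (the rewrite author's own statement) =====
-- stated objective: alternative
-- what changed: B computes the answer per maximal equal-character run via the closed-form triangular count L*(L+1)//2 instead of A's per-position incremental run-length accumulation; B returns 0 on the empty string where A raises.
-- crash fix: On the empty string A raises IndexError (s[0]); B returns 0. — e.g. on count_same_palindromes(""): A raises IndexError, B returns 0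
import Mathlib
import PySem

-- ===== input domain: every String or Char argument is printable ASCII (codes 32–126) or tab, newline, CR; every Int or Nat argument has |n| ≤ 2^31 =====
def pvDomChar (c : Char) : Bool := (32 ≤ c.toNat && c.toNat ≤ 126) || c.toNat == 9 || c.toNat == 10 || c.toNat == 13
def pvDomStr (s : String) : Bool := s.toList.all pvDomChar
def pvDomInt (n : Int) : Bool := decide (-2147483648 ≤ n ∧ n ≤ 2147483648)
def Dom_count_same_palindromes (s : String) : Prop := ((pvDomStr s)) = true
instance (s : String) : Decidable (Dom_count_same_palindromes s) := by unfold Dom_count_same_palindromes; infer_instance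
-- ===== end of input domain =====

-- B counts per maximal equal-character run with the closed form L*(L+1)//2 instead of A's
-- per-position incremental accumulation; A raises IndexError on "", excluded by Pre_, where B returns 0.


-- ===== PORT A =====
-- loop over s[1:] with state (last_letter, len_seq, count)
def pvALoop : List Char → Char → Int → Int → Int
  | [], _, _, count => count
  | c :: cs, last, len_seq, count =>
    let len' := if c == last then len_seq + 1 else 1
    pvALoop cs c len' (count + len')

def count_same_palindromes (s : String) : Int :=
  match s.toList with
  | [] => 0          -- unreachable under Pre_: Python raises IndexError on s[0]
  | c :: cs => pvALoop cs c 1 1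

-- ===== PORT B =====
def pvTri (r : Int) : Int := PySem.Int.floordiv (r * (r + 1)) 2

-- loop over s with state (total, run, prev)
def pvBLoop : List Char → Int × Int × Option Char → Int × Int × Option Char
  | [], st => st
  | c :: cs, (total, run, prev) =>
    if some c == prev then pvBLoop cs (total, run + 1, prev)
    else pvBLoop cs (total + pvTri run, 1, some c)

def count_same_palindromes_alt (s : String) : Int :=
  let st := pvBLoop s.toList (0, 0, none)
  st.1 + pvTri st.2.1

-- ===== PRECONDITION & SPEC =====
-- Pre_ excludes exactly the empty string, on which Python A raises IndexError at s[0].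
def Pre_count_same_palindromes (s : String) : Prop := s ≠ ""
instance (s : String) : Decidable (Pre_count_same_palindromes s) := by unfold Pre_count_same_palindromes; infer_instance
def pvWitness_count_same_palindromes : String := "aabcc"

-- On the empty string A raises IndexError (s[0]); B returns 0.
def Raises_count_same_palindromes (s : String) : Prop := s = ""
instance (s : String) : Decidable (Raises_count_same_palindromes s) := by unfold Raises_count_same_palindromes; infer_instance
def pvRaiseWitness_count_same_palindromes : String := ""
def pvRaiseWitnessOut_count_same_palindromes : Int := 0

def Spec_count_same_palindromes (s : String) (out : Int) : Prop := out = count_same_palindromes_alt s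
instance (s : String) (out : Int) : Decidable (Spec_count_same_palindromes s out) := by unfold Spec_count_same_palindromes; infer_instance

-- ===== CLAIM (what is proved, stated in full; the proofs are below) =====
def Claim_equal_count_same_palindromes : Prop := ∀ (s : String), Dom_count_same_palindromes s → Pre_count_same_palindromes s → Spec_count_same_palindromes s (count_same_palindromes s)
def Claim_raises_count_same_palindromes : Prop := (∀ (s : String), Dom_count_same_palindromes s → Raises_count_same_palindromes s → ¬ Pre_count_same_palindromes s) ∧ (Dom_count_same_palindromes (pvRaiseWitness_count_same_palindromes) ∧ Raises_count_same_palindromes (pvRaiseWitness_count_same_palindromes) ∧ count_same_palindromes_alt (pvRaiseWitness_count_same_palindromes) = pvRaiseWitnessOut_count_same_palindromes)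

-- ===== LEMMAS AND PROOFS =====

theorem pvTri_succ (r : Int) : pvTri (r + 1) = pvTri r + r + 1 := by
  obtain ⟨k, hk⟩ : Even (r * (r + 1)) := Int.even_mul_succ_self r
  have h1 : r * (r + 1) = 2 * k := by linarith
  have h2 : (r + 1) * (r + 1 + 1) = 2 * (k + r + 1) := by ring_nf; linarith
  simp [pvTri, PySem.Int.floordiv, h1, h2, Int.mul_fdiv_cancel_left]

theorem pvTri_one : pvTri 1 = 1 := by decide

theorem pvLoop_eq (rest : List Char) (last : Char) (run total : Int) :
    pvALoop rest last run (total + pvTri run) =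
      (let st := pvBLoop rest (total, run, some last); st.1 + pvTri st.2.1) := by
  induction rest generalizing last run total with
  | nil => simp [pvALoop, pvBLoop]
  | cons c cs ih =>
    by_cases h : c = last
    · subst h
      simp only [pvALoop, pvBLoop, beq_self_eq_true, if_pos]
      rw [show total + pvTri run + (run + 1) = total + pvTri (run + 1) by rw [pvTri_succ]; ring]
      exact ih c (run + 1) total
    · have hb : (some c == some last) = false := by
        simp [h]
      simp only [pvALoop, pvBLoop, hb, beq_iff_eq, h, if_false]
      rw [show total + pvTri run + 1 = (total + pvTri run) + pvTri 1 by rw [pvTri_one]]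
      exact ih c 1 (total + pvTri run)

-- ===== VERDICT (by name: the statement is the Claim_ definition above) =====
theorem count_same_palindromes_raises : Claim_raises_count_same_palindromes := by
  unfold Claim_raises_count_same_palindromes
  exact ⟨by intro s _ hr; simp [Raises_count_same_palindromes] at hr; simp [Pre_count_same_palindromes, hr], by decide⟩

theorem count_same_palindromes_spec : Claim_equal_count_same_palindromes := by
  intro s _ hpre
  unfold Spec_count_same_palindromes count_same_palindromes count_same_palindromes_alt
  match hl : s.toList with
  | [] =>
    have hs : s = "" := String.toList_inj.mp (by simp [hl])
    have h := count_same_palindromes_raises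
    unfold Claim_raises_count_same_palindromes at h
    exact absurd hpre (h.1 s (by assumption) hs)
  | c :: cs =>
    have h0 : pvBLoop (c :: cs) (0, 0, none) = pvBLoop cs (0, 1, some c) := by
      simp [pvBLoop, pvTri]
    rw [h0]
    have := pvLoop_eq cs c 1 0
    simpa [pvTri_one] using this
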